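-- pv_equiv track=rewrite | github.com/GizawAAiT/Codeforces | A_Amusing_Joke.py | solve
-- ===== SOURCE A (Python) =====
-- from collections import defaultdict
--
-- def solve(a, b, c):
--     ab = a+b
--
--     cnt_ab = defaultdict(int)
--     cnt_c = defaultdict(int)
--
--     for chr in ab:
--         cnt_ab[chr] += 1
--
--     for chr in c:
--         cnt_c[chr] += 1
--
--     for key in cnt_ab.keys():
--         if cnt_ab[key] != cnt_c[key]:
--             return 'NO'
--
--     for key in cnt_c.keys():
--         if cnt_ab[key] != cnt_c[key]:
--             return 'NO'
--
--     return 'YES'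
-- ===== SOURCE B (Python) =====
-- def solve(a, b, c):
--     return 'YES' if sorted(a + b) == sorted(c) else 'NO'
-- ===== Notes on version B (the rewrite author's own statement) =====
-- stated objective: idiomatic
-- what changed: Replaces the two defaultdict frequency tables and the two key-scanning loops with a single comparison of the sorted character sequences (sorted-equality = multiset-equality).
import Mathlib
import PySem

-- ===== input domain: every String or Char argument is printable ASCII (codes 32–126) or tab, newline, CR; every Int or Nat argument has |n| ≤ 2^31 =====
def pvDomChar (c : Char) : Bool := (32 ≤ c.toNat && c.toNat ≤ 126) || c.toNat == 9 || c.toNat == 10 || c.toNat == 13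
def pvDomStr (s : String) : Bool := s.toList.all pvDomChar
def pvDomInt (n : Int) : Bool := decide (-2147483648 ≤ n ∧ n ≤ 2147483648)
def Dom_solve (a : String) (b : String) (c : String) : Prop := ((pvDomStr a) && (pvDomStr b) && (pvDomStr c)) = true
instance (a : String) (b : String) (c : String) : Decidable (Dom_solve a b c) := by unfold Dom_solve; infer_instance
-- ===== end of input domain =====

-- B replaces A's two defaultdict frequency tables and key-scanning loops with a
-- single comparison of the sorted character sequences (more idiomatic, same result).


-- ===== PORT A =====
-- defaultdict(int) counting loop 'cnt[chr] += 1' = foldl of Dict.modify with default 0.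
-- (defaultdict's insert-on-read in the comparison loops never changes the returned value:
-- a key read as 0 and inserted compares equal by the time the other loop scans it.)
def solve (a : String) (b : String) (c : String) : String :=
  let ab := a.toList ++ b.toList
  let cnt_ab := ab.foldl (fun d x => d.modify x 0 (· + 1)) (PySem.Dict.empty : PySem.Dict Char Int)
  let cnt_c := c.toList.foldl (fun d x => d.modify x 0 (· + 1)) (PySem.Dict.empty : PySem.Dict Char Int)
  if cnt_ab.keys.any (fun key => cnt_ab.getD key 0 != cnt_c.getD key 0) then "NO"
  else if cnt_c.keys.any (fun key => cnt_ab.getD key 0 != cnt_c.getD key 0) then "NO"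
  else "YES"

-- ===== PORT B =====
def solve_alt (a : String) (b : String) (c : String) : String :=
  if PySem.List.sorted (a.toList ++ b.toList) (fun x => x) false
      = PySem.List.sorted c.toList (fun x => x) false then "YES" else "NO"

-- ===== PRECONDITION & SPEC =====
def Spec_solve (a : String) (b : String) (c : String) (out : String) : Prop := out = solve_alt a b c
instance (a : String) (b : String) (c : String) (out : String) : Decidable (Spec_solve a b c out) := by unfold Spec_solve; infer_instance

-- ===== CLAIM (what is proved, stated in full; the proofs are below) =====
def Claim_equal_solve : Prop := ∀ (a : String) (b : String) (c : String), Dom_solve a b c → Spec_solve a b c (solve a b c)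

-- ===== LEMMAS AND PROOFS =====

-- A's two no-mismatch loop conditions together say exactly: ab is a permutation of c.
theorem any_false_iff (ab cl : List Char) :
    ((PySem.Set.ofList ab).any (fun k => ((ab.count k : Int) != (cl.count k : Int))) = false
   ∧ (PySem.Set.ofList cl).any (fun k => ((ab.count k : Int) != (cl.count k : Int))) = false)
    ↔ ab.Perm cl := by
  rw [List.any_eq_false, List.any_eq_false]
  constructor
  · rintro ⟨h1, h2⟩
    rw [List.perm_iff_count]
    intro x
    by_cases hx : x ∈ ab
    · have := h1 x ((PySem.Set.mem_ofList _ _).mpr hx)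
      simp only [bne_iff_ne, ne_eq, not_not] at this
      exact_mod_cast this
    by_cases hy : x ∈ cl
    · have := h2 x ((PySem.Set.mem_ofList _ _).mpr hy)
      simp only [bne_iff_ne, ne_eq, not_not] at this
      exact_mod_cast this
    · simp [List.count_eq_zero_of_not_mem hx, List.count_eq_zero_of_not_mem hy]
  · intro hp
    have hc := List.perm_iff_count.mp hp
    refine ⟨fun k _ => ?_, fun k _ => ?_⟩ <;> simp [hc k]

theorem solve_eq_solve_alt (a b c : String) : solve a b c = solve_alt a b c := by
  unfold solve solve_alt
  simp only [← PySem.Dict.counter_eq_foldl, PySem.Dict.getD_counter, PySem.Dict.keys_counter,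
    PySem.List.sorted_id_eq_sorted_id_iff_perm]
  by_cases hp : (a.toList ++ b.toList).Perm c.toList
  · obtain ⟨h1, h2⟩ := (any_false_iff (a.toList ++ b.toList) c.toList).mpr hp
    rw [h1, h2]
    simp [hp]
  · rw [if_neg hp]
    by_cases e1 : (PySem.Set.ofList (a.toList ++ b.toList)).any
        (fun k => (((a.toList ++ b.toList).count k : Int) != (c.toList.count k : Int))) = true
    · rw [if_pos e1]
    · have e1f := eq_false_of_ne_true e1
      have e2 : (PySem.Set.ofList c.toList).any
          (fun k => (((a.toList ++ b.toList).count k : Int) != (c.toList.count k : Int))) = true := by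
        by_contra e2h
        exact hp ((any_false_iff (a.toList ++ b.toList) c.toList).mp ⟨e1f, eq_false_of_ne_true e2h⟩)
      rw [if_neg e1, if_pos e2]

-- ===== VERDICT (by name: the statement is the Claim_ definition above) =====
theorem solve_spec : Claim_equal_solve := by
  intro a b c _
  exact solve_eq_solve_alt a b c
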